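-- pv_equiv track=rewrite | github.com/Alperemrehas/web-search-engine-design | main.py | compute_term_based_cost
-- ===== SOURCE A (Python) =====
-- def compute_term_based_cost(queries, nodes, K):
--     costs_per_node = [0] * K  # Track costs for each node
--     broker_costs = []  # Track broker costs for each query
--     overall_costs = []  # Track overall costs for each query
--
--     for query in queries:
--         query_terms = query.split()
--         node_costs = [0] * K
--         partial_results = []
--
--         for term in query_terms:
--             for node_id, node_terms in nodes.items():
--                 if term in node_terms:
--                     node_costs[node_id] += node_terms[term]
--                     partial_results.append(node_terms[term])
--                     break
--
--         max_node_cost = max(node_costs)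
--         broker_cost = sum(min(partial_results[i], partial_results[j]) for i in range(len(partial_results)) for j in range(i, len(partial_results)))
--         overall_cost = max_node_cost + broker_cost
--
--         # Update costs
--         for i in range(K):
--             costs_per_node[i] += node_costs[i]
--         broker_costs.append(broker_cost)
--         overall_costs.append(overall_cost)
--
--     return costs_per_node, broker_costs, overall_costs
-- ===== SOURCE B (Python) =====
-- def compute_term_based_cost(queries, nodes, K):
--     # Build once: term -> (first node holding it, its cost); replaces A's per-term scan over nodes.
--     index = {}
--     for node_id, node_terms in nodes.items():
--         for term, cost in node_terms.items():
--             if term not in index: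
--                 index[term] = (node_id, cost)
--
--     costs_per_node = [0] * K
--     broker_costs = []
--     overall_costs = []
--
--     for query in queries:
--         node_costs = [0] * K
--         partial = []
--         for term in query.split():
--             hit = index.get(term)
--             if hit is not None:
--                 nid, c = hit
--                 node_costs[nid] += c
--                 partial.append(c)
--         s = sorted(partial)
--         m = len(s)
--         # sum over i<=j of min(partial[i], partial[j]) = sum_k s[k]*(m-k) on the sorted list
--         broker = sum(v * (m - i) for i, v in enumerate(s))
--         costs_per_node = [a + b for a, b in zip(costs_per_node, node_costs)]
--         broker_costs.append(broker)
--         overall_costs.append(max(node_costs) + broker)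
--
--     return costs_per_node, broker_costs, overall_costs
-- ===== Notes on version B (the rewrite author's own statement) =====
-- stated objective: faster
-- what changed: B builds a term->(node,cost) index once so each query term is one dict lookup instead of a scan over all nodes, and replaces the O(m^2) pairwise-min double loop for the broker cost by sorting the partial results and taking the rank-weighted sum sum_k s[k]*(m-k).
import Mathlib
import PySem

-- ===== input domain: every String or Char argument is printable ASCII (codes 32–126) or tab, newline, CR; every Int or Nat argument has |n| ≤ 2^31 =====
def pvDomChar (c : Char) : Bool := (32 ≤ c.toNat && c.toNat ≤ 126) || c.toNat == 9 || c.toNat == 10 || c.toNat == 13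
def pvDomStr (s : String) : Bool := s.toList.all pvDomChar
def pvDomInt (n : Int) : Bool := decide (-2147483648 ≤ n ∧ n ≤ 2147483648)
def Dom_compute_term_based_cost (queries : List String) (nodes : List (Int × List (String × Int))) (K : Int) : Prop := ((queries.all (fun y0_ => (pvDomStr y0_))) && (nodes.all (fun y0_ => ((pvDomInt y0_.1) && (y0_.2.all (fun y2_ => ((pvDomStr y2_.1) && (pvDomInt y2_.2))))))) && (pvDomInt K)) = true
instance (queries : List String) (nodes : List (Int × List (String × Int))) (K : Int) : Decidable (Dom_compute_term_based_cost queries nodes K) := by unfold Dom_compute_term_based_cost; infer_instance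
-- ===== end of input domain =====

-- B replaces A's per-term scan over all nodes by a term index built once and A's quadratic
-- pairwise-min double loop by a sort with a rank-weighted sum; return values agree on Pre_.

-- ===== PORT A =====
-- shared primitive: l[i] += v (Python index semantics; exact for in-range indices, which Pre_ guarantees)
def pvSetAdd (l : List Int) (i : Int) (v : Int) : List Int :=
  PySem.List.pySetD l i (PySem.List.pyGetD l i 0 + v)

-- 'for node_id, node_terms in nodes.items(): if term in node_terms: …; break' as a first-match helper
def pvScanNodes (nodes : List (Int × List (String × Int))) (term : String) : Option (Int × Int) :=
  match nodes with
  | [] => none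
  | (nid, nts) :: rest =>
    match (PySem.Dict.mk nts).get? term with
    | some c => some (nid, c)
    | none => pvScanNodes rest term

-- the per-query term loop of A: returns (node_costs, partial_results)
def pvAQueryState (nodes : List (Int × List (String × Int))) (K : Int) (q : String) :
    List Int × List Int :=
  (PySem.Str.split₀ q).foldl
    (fun (st : List Int × List Int) term =>
      match pvScanNodes nodes term with
      | some p => (pvSetAdd st.1 p.1 p.2, st.2 ++ [p.2])
      | none => st)
    (List.replicate K.toNat 0, [])

-- A's broker cost: sum over i ≤ j of min(partial_results[i], partial_results[j])
def pvBrokerA (prs : List Int) : Int :=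
  let m : Int := prs.length
  ((PySem.List.pyRange 0 m 1).map (fun i =>
    ((PySem.List.pyRange i m 1).map (fun j =>
      min (PySem.List.pyGetD prs i 0) (PySem.List.pyGetD prs j 0))).sum)).sum

def compute_term_based_cost (queries : List String) (nodes : List (Int × List (String × Int))) (K : Int) : List Int × List Int × List Int :=
  queries.foldl
    (fun (acc : List Int × List Int × List Int) query =>
      let st := pvAQueryState nodes K query
      let nc := st.1
      -- max(node_costs) raises on an empty list; under Pre_ the default branch is never taken
      let maxNodeCost := (PySem.List.max? nc (fun x => x)).getD 0
      let broker := pvBrokerA st.2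
      let costs := (PySem.List.pyRange 0 K 1).foldl
        (fun c i => pvSetAdd c i (PySem.List.pyGetD nc i 0)) acc.1
      (costs, acc.2.1 ++ [broker], acc.2.2 ++ [maxNodeCost + broker]))
    (List.replicate K.toNat 0, [], [])

-- ===== PORT B =====
-- term -> (first node holding it, its cost), built once
def pvBuildIndex (nodes : List (Int × List (String × Int))) : PySem.Dict String (Int × Int) :=
  nodes.foldl
    (fun idx p =>
      p.2.foldl
        (fun idx tc => if idx.contains tc.1 then idx else idx.insert tc.1 (p.1, tc.2))
        idx)
    PySem.Dict.empty

-- the per-query term loop of B: one index lookup per term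
def pvBQueryState (index : PySem.Dict String (Int × Int)) (K : Int) (q : String) :
    List Int × List Int :=
  (PySem.Str.split₀ q).foldl
    (fun (st : List Int × List Int) term =>
      match index.get? term with
      | some p => (pvSetAdd st.1 p.1 p.2, st.2 ++ [p.2])
      | none => st)
    (List.replicate K.toNat 0, [])

-- B's broker cost: sorted partial list, rank-weighted sum Σ s[k]·(m-k)
def pvBrokerB (prs : List Int) : Int :=
  let s := PySem.List.sorted prs (fun x => x) false
  let m : Int := s.length
  ((PySem.List.enumerate s).map (fun iv => iv.2 * (m - iv.1))).sum

def compute_term_based_cost_alt (queries : List String) (nodes : List (Int × List (String × Int))) (K : Int) : List Int × List Int × List Int :=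
  let index := pvBuildIndex nodes
  queries.foldl
    (fun (acc : List Int × List Int × List Int) query =>
      let st := pvBQueryState index K query
      let nc := st.1
      let broker := pvBrokerB st.2
      (acc.1.zipWith (· + ·) nc, acc.2.1 ++ [broker],
       acc.2.2 ++ [(PySem.List.max? nc (fun x => x)).getD 0 + broker]))
    (List.replicate K.toNat 0, [], [])

-- ===== PRECONDITION & SPEC =====
-- Pre_ excludes exactly the inputs on which A raises: ValueError (max of an empty list) when
-- K ≤ 0 and queries ≠ [], and IndexError when some query term's FIRST containing node (the one
-- A's break selects) has an id outside [-K, K). The Lean ports agree on all inputs, so the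
-- equality proof needs no Pre_; Pre_ only delimits where the Python A returns normally.
def Pre_compute_term_based_cost (queries : List String) (nodes : List (Int × List (String × Int))) (K : Int) : Prop :=
  (queries = [] ∨ 1 ≤ K) ∧
    ∀ q ∈ queries, ∀ t ∈ PySem.Str.split₀ q, ∀ (i : Nat) (hi : i < nodes.length),
      ((PySem.Dict.mk nodes[i].2).contains t = true ∧
        ∀ (j : Nat) (hj : j < i), ¬((PySem.Dict.mk (nodes[j]'(Nat.lt_trans hj hi)).2).contains t = true)) →
      (-K ≤ nodes[i].1 ∧ nodes[i].1 < K)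
instance (queries : List String) (nodes : List (Int × List (String × Int))) (K : Int) : Decidable (Pre_compute_term_based_cost queries nodes K) := by unfold Pre_compute_term_based_cost; infer_instance

def pvWitness_compute_term_based_cost : List String × (List (Int × List (String × Int))) × Int :=
  (["a b", "b"], [(0, [("a", 2)]), (1, [("b", 3)])], 2)

def Spec_compute_term_based_cost (queries : List String) (nodes : List (Int × List (String × Int))) (K : Int) (out : List Int × List Int × List Int) : Prop := out = compute_term_based_cost_alt queries nodes K
instance (queries : List String) (nodes : List (Int × List (String × Int))) (K : Int) (out : List Int × List Int × List Int) : Decidable (Spec_compute_term_based_cost queries nodes K out) := by unfold Spec_compute_term_based_cost; infer_instance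

-- ===== CLAIM (what is proved, stated in full; the proofs are below) =====
def Claim_equal_compute_term_based_cost : Prop := ∀ (queries : List String) (nodes : List (Int × List (String × Int))) (K : Int), Dom_compute_term_based_cost queries nodes K → Pre_compute_term_based_cost queries nodes K → Spec_compute_term_based_cost queries nodes K (compute_term_based_cost queries nodes K)

-- ===== LEMMAS AND PROOFS =====

-- ---- the index built by B answers exactly A's first-match scan ----
theorem pv_idx_inner (nid : Int) (nts : List (String × Int)) (d : PySem.Dict String (Int × Int)) (t : String) :
    (nts.foldl (fun idx tc => if idx.contains tc.1 then idx else idx.insert tc.1 (nid, tc.2)) d).get? t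
      = ((d.get? t).or (((PySem.Dict.mk nts).get? t).map (fun c => (nid, c)))) := by
  induction nts generalizing d with
  | nil =>
      simp [PySem.Dict.get?]
  | cons kv rest ih =>
      obtain ⟨k, v⟩ := kv
      rw [List.foldl_cons, ih, PySem.Dict.get?_mk_cons]
      by_cases hk : k = t
      · subst hk
        simp only [beq_self_eq_true, if_true]
        by_cases hc : d.contains k = true
        · simp only [hc, if_true]
          have hs : (d.get? k).isSome := by
            rw [PySem.Dict.contains_eq_isSome_get?] at hc; exact hc
          obtain ⟨w, hw⟩ := Option.isSome_iff_exists.mp hs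
          simp [hw]
        · simp only [Bool.not_eq_true] at hc
          simp only [hc, Bool.false_eq_true, if_false]
          have hn : d.get? k = none :=
            (PySem.Dict.get?_eq_none_iff_contains d k).mpr hc
          rw [hn]
          simp [PySem.Dict.get?_insert_self]
      · by_cases hc : d.contains k = true
        · simp only [hc, if_true]
          simp [hk]
        · simp only [Bool.not_eq_true] at hc
          simp only [hc, Bool.false_eq_true, if_false]
          rw [PySem.Dict.get?_insert_of_ne _ _ (fun h => hk h.symm)]
          have : (k == t) = false := by simp [hk]
          rw [this]
          simp

theorem pv_idx_outer (t : String) :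
    ∀ (nodes : List (Int × List (String × Int))) (d : PySem.Dict String (Int × Int)),
      (nodes.foldl
        (fun idx p =>
          p.2.foldl
            (fun idx tc => if idx.contains tc.1 then idx else idx.insert tc.1 (p.1, tc.2))
            idx) d).get? t
      = (d.get? t).or (pvScanNodes nodes t) := by
  intro nodes
  induction nodes with
  | nil => intro d; simp [pvScanNodes]
  | cons p rest ih =>
      intro d
      obtain ⟨nid, nts⟩ := p
      rw [List.foldl_cons, ih, pv_idx_inner, Option.or_assoc]
      show _ = (d.get? t).or (pvScanNodes ((nid, nts) :: rest) t)
      congr 1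
      simp only [pvScanNodes]
      cases h : (PySem.Dict.mk nts).get? t <;> simp

theorem pv_idx_scan (nodes : List (Int × List (String × Int))) (t : String) :
    (pvBuildIndex nodes).get? t = pvScanNodes nodes t := by
  rw [pvBuildIndex, pv_idx_outer]
  simp [PySem.Dict.get?_empty]

-- ---- broker: Finset formulations ----
def pvF (l : List Int) : Int :=
  ∑ i ∈ Finset.range l.length, ∑ j ∈ Finset.Ico i l.length, min (l.getD i 0) (l.getD j 0)
def pvS2 (l : List Int) : Int :=
  ∑ i ∈ Finset.range l.length, ∑ j ∈ Finset.range l.length, min (l.getD i 0) (l.getD j 0)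
def pvG (s : List Int) : Int :=
  ∑ k ∈ Finset.range s.length, s.getD k 0 * ((s.length : Int) - (k : Int))

theorem pv_sum_range_list (n : Nat) (f : Nat → Int) :
    ((List.range n).map f).sum = ∑ i ∈ Finset.range n, f i := rfl

theorem pv_sum_map_getD (f : Int → Int) (l : List Int) :
    ∑ i ∈ Finset.range l.length, f (l.getD i 0) = (l.map f).sum := by
  induction l using List.reverseRecOn with
  | nil => simp
  | append_singleton xs x ih =>
      rw [List.length_append, List.map_append, List.sum_append]
      simp only [List.length_singleton, Finset.sum_range_succ]
      rw [← ih]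
      simp [List.getD]
      exact Finset.sum_congr rfl (fun i hi => by
        simp at hi
        simp [List.getElem?_append_left hi])

theorem pv_brokerA_eq_F (l : List Int) : pvBrokerA l = pvF l := by
  rw [pvBrokerA, pvF]
  rw [PySem.List.pyRange_one, List.map_map, pv_sum_range_list]
  have h0 : ((l.length : Int) - 0).toNat = l.length := by omega
  rw [h0]
  refine Finset.sum_congr rfl (fun i hi => ?_)
  simp only [Finset.mem_range] at hi
  simp only [Function.comp]
  rw [zero_add, PySem.List.pyRange_one, List.map_map, pv_sum_range_list]
  have h1 : ((l.length : Int) - (i : Int)).toNat = l.length - i := by omega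
  rw [h1]
  rw [Finset.sum_Ico_eq_sum_range]
  refine Finset.sum_congr rfl (fun j hj => ?_)
  simp only [Function.comp]
  have : ((i : Int) + (j : Int)) = ((i + j : Nat) : Int) := by push_cast; ring
  rw [this, PySem.List.pyGetD_natCast, PySem.List.pyGetD_natCast]

theorem pv_brokerB_eq_G (l : List Int) :
    pvBrokerB l = pvG (PySem.List.sorted l (fun x => x) false) := by
  rw [pvBrokerB, pvG]
  set s := PySem.List.sorted l (fun x => x) false with hs
  rw [PySem.List.enumerate_eq_map_pyRange s 0, List.map_map]
  have hlen : PySem.List.len s = (s.length : Int) := by simp [PySem.List.len_eq]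
  rw [hlen, PySem.List.pyRange_one, List.map_map, pv_sum_range_list]
  have h0 : ((s.length : Int) - 0).toNat = s.length := by omega
  rw [h0]
  refine Finset.sum_congr rfl (fun k hk => ?_)
  simp only [Function.comp]
  rw [zero_add, PySem.List.pyGetD_natCast]

theorem pv_two_F (l : List Int) : 2 * pvF l = pvS2 l + l.sum := by
  have hdiag : ∑ i ∈ Finset.range l.length, min (l.getD i 0) (l.getD i 0) = l.sum := by
    have := pv_sum_map_getD (fun x => x) l
    simpa using this
  have hF2 : pvF l = ∑ j ∈ Finset.range l.length, ∑ i ∈ Finset.range (j+1), min (l.getD i 0) (l.getD j 0) := by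
    rw [pvF]
    rw [Finset.range_eq_Ico, Finset.sum_Ico_Ico_comm]
  have hsplit : pvS2 l = ∑ i ∈ Finset.range l.length, ((∑ j ∈ Finset.range i, min (l.getD i 0) (l.getD j 0)) + ∑ j ∈ Finset.Ico i l.length, min (l.getD i 0) (l.getD j 0)) := by
    rw [pvS2]
    refine Finset.sum_congr rfl (fun i hi => ?_)
    simp only [Finset.mem_range] at hi
    rw [Finset.range_eq_Ico, ← Finset.sum_Ico_consecutive _ (Nat.zero_le i) (le_of_lt hi), ← Finset.range_eq_Ico]
  have hlow : ∑ i ∈ Finset.range l.length, ∑ j ∈ Finset.range i, min (l.getD i 0) (l.getD j 0)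
      = pvF l - l.sum := by
    have : pvF l = (∑ j ∈ Finset.range l.length, ∑ i ∈ Finset.range j, min (l.getD i 0) (l.getD j 0)) + l.sum := by
      rw [hF2, ← hdiag, ← Finset.sum_add_distrib]
      refine Finset.sum_congr rfl (fun j _ => ?_)
      rw [Finset.sum_range_succ]
    rw [this]
    ring_nf
    refine Finset.sum_congr rfl (fun i _ => Finset.sum_congr rfl (fun j _ => min_comm _ _))
  rw [hsplit, Finset.sum_add_distrib, hlow, ← pvF]
  ring

theorem pv_S2_list (l : List Int) :
    pvS2 l = (l.map (fun x => (l.map (fun y => min x y)).sum)).sum := by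
  rw [pvS2, ← pv_sum_map_getD (fun x => (l.map (fun y => min x y)).sum) l]
  refine Finset.sum_congr rfl (fun i _ => ?_)
  rw [← pv_sum_map_getD (fun y => min (l.getD i 0) y) l]

theorem pv_S2_perm {l s : List Int} (h : l.Perm s) : pvS2 l = pvS2 s := by
  rw [pv_S2_list, pv_S2_list]
  have hin : ∀ x : Int, (l.map (fun y => min x y)).sum = (s.map (fun y => min x y)).sum :=
    fun x => (h.map (fun y => min x y)).sum_eq
  calc (l.map (fun x => (l.map (fun y => min x y)).sum)).sum
      = (l.map (fun x => (s.map (fun y => min x y)).sum)).sum := by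
        rw [List.map_congr_left (fun x _ => hin x)]
    _ = (s.map (fun x => (s.map (fun y => min x y)).sum)).sum :=
        (h.map (fun x => (s.map (fun y => min x y)).sum)).sum_eq

theorem pv_F_sorted (l : List Int) :
    pvF (PySem.List.sorted l (fun x => x) false) = pvG (PySem.List.sorted l (fun x => x) false) := by
  set s := PySem.List.sorted l (fun x => x) false with hs
  rw [pvF, pvG]
  refine Finset.sum_congr rfl (fun i hi => ?_)
  simp only [Finset.mem_range] at hi
  have hconst : ∀ j ∈ Finset.Ico i s.length,
      min (s.getD i 0) (s.getD j 0) = s.getD i 0 := by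
    intro j hj
    simp only [Finset.mem_Ico] at hj
    have hij : s.getD i 0 ≤ s.getD j 0 := by
      rw [List.getD, List.getD, List.getElem?_eq_getElem hi, List.getElem?_eq_getElem hj.2]
      simpa using PySem.List.sorted_id_getElem_mono l hj.1 hj.2
    exact min_eq_left hij
  rw [Finset.sum_congr rfl hconst, Finset.sum_const, Nat.card_Ico, nsmul_eq_mul, mul_comm]
  congr 1
  omega

theorem pv_broker_eq (l : List Int) : pvBrokerA l = pvBrokerB l := by
  have hperm : (PySem.List.sorted l (fun x => x) false).Perm l := PySem.List.sorted_perm l _ false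
  have h1 : 2 * pvF l = 2 * pvF (PySem.List.sorted l (fun x => x) false) := by
    rw [pv_two_F, pv_two_F, pv_S2_perm hperm.symm, hperm.sum_eq]
  have hF : pvF l = pvF (PySem.List.sorted l (fun x => x) false) := by omega
  rw [pv_brokerA_eq_F, pv_brokerB_eq_G, hF, pv_F_sorted]

-- ---- costs_per_node loop = zipWith ----
theorem pv_setfold (d : List Int) :
    ∀ (k : Nat) (c : List Int), k ≤ c.length → k ≤ d.length →
      (List.range k).foldl (fun c' i => c'.set i (c'.getD i 0 + d.getD i 0)) c
        = (List.zipWith (· + ·) c d).take k ++ c.drop k := by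
  intro k
  induction k with
  | zero => intro c _ _; simp
  | succ k ih =>
      intro c hk hd
      rw [List.range_succ, List.foldl_append, ih c (by omega) (by omega)]
      have hkc : k < c.length := by omega
      have hkd : k < d.length := by omega
      have htl : ((List.zipWith (· + ·) c d).take k).length = k := by
        rw [List.length_take, List.length_zipWith]; omega
      have hdrop : c.drop k = c.getD k 0 :: c.drop (k+1) := by
        rw [List.getD, List.getElem?_eq_getElem hkc]
        exact (List.getElem_cons_drop hkc).symm
      simp only [List.foldl_cons, List.foldl_nil]
      rw [hdrop]
      have hmid : ((List.zipWith (· + ·) c d).take k ++ c.getD k 0 :: c.drop (k+1)).getD k 0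
          = c.getD k 0 := by
        rw [List.getD, List.getElem?_append_right htl.le, htl, Nat.sub_self]
        simp
      rw [hmid, List.set_append_right _ _ htl.le, htl, Nat.sub_self, List.set_cons_zero]
      have hzt : (List.zipWith (· + ·) c d).take (k+1)
          = (List.zipWith (· + ·) c d).take k ++ [c.getD k 0 + d.getD k 0] := by
        rw [List.take_add_one]
        congr 1
        rw [List.getElem?_eq_getElem (by rw [List.length_zipWith]; omega)]
        simp [List.getElem_zipWith, List.getD, hkc, hkd]
      rw [hzt, List.append_assoc, List.singleton_append]

theorem pv_costs_fold (K : Int) (c d : List Int) (hc : c.length = K.toNat) (hd : d.length = K.toNat) :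
    (PySem.List.pyRange 0 K 1).foldl (fun c' i => pvSetAdd c' i (PySem.List.pyGetD d i 0)) c
      = List.zipWith (· + ·) c d := by
  rw [PySem.List.pyRange_one, List.foldl_map]
  have hstep : ∀ (c' : List Int) (k : Nat),
      pvSetAdd c' (0 + (k : Int)) (PySem.List.pyGetD d (0 + (k : Int)) 0)
        = c'.set k (c'.getD k 0 + d.getD k 0) := by
    intro c' k
    simp [pvSetAdd, PySem.List.pySetD_natCast, PySem.List.pyGetD_natCast]
  simp only [hstep]
  have hK : (K - 0).toNat = c.length := by omega
  rw [hK, pv_setfold d c.length c le_rfl (by omega)]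
  rw [List.take_of_length_le (by rw [List.length_zipWith]; omega), List.drop_length, List.append_nil]

-- ---- lengths ----
theorem pv_fold_len (lookup : String → Option (Int × Int)) :
    ∀ (ts : List String) (st : List Int × List Int),
      (ts.foldl
        (fun (st : List Int × List Int) term =>
          match lookup term with
          | some p => (pvSetAdd st.1 p.1 p.2, st.2 ++ [p.2])
          | none => st) st).1.length = st.1.length := by
  intro ts
  induction ts with
  | nil => intro st; rfl
  | cons t ts ih =>
      intro st
      rw [List.foldl_cons, ih]
      cases h : lookup t <;> simp [pvSetAdd, PySem.List.length_pySetD]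

theorem pv_state_len (nodes : List (Int × List (String × Int))) (K : Int) (q : String) :
    (pvAQueryState nodes K q).1.length = K.toNat := by
  rw [pvAQueryState, pv_fold_len]
  simp

-- ---- per-query and whole-fold agreement ----
theorem pv_query_state_eq (nodes : List (Int × List (String × Int))) (K : Int) (q : String) :
    pvBQueryState (pvBuildIndex nodes) K q = pvAQueryState nodes K q := by
  rw [pvBQueryState, pvAQueryState]
  congr 1
  funext st term
  rw [pv_idx_scan]

theorem pv_main_fold (nodes : List (Int × List (String × Int))) (K : Int) :
    ∀ (qs : List String) (acc : List Int × List Int × List Int), acc.1.length = K.toNat →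
      qs.foldl
        (fun (acc : List Int × List Int × List Int) query =>
          let st := pvAQueryState nodes K query
          let nc := st.1
          let maxNodeCost := (PySem.List.max? nc (fun x => x)).getD 0
          let broker := pvBrokerA st.2
          let costs := (PySem.List.pyRange 0 K 1).foldl
            (fun c i => pvSetAdd c i (PySem.List.pyGetD nc i 0)) acc.1
          (costs, acc.2.1 ++ [broker], acc.2.2 ++ [maxNodeCost + broker])) acc
      = qs.foldl
        (fun (acc : List Int × List Int × List Int) query =>
          let st := pvBQueryState (pvBuildIndex nodes) K query
          let nc := st.1
          let broker := pvBrokerB st.2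
          (acc.1.zipWith (· + ·) nc, acc.2.1 ++ [broker],
           acc.2.2 ++ [(PySem.List.max? nc (fun x => x)).getD 0 + broker])) acc := by
  intro qs
  induction qs with
  | nil => intro acc _; rfl
  | cons q qs ih =>
      intro acc hacc
      rw [List.foldl_cons, List.foldl_cons]
      have hstep :
          (let st := pvAQueryState nodes K q
           let nc := st.1
           let maxNodeCost := (PySem.List.max? nc (fun x => x)).getD 0
           let broker := pvBrokerA st.2
           let costs := (PySem.List.pyRange 0 K 1).foldl
             (fun c i => pvSetAdd c i (PySem.List.pyGetD nc i 0)) acc.1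
           ((costs, acc.2.1 ++ [broker], acc.2.2 ++ [maxNodeCost + broker]) : List Int × List Int × List Int))
          = (let st := pvBQueryState (pvBuildIndex nodes) K q
             let nc := st.1
             let broker := pvBrokerB st.2
             (acc.1.zipWith (· + ·) nc, acc.2.1 ++ [broker],
              acc.2.2 ++ [(PySem.List.max? nc (fun x => x)).getD 0 + broker])) := by
        simp only [pv_query_state_eq]
        rw [pv_broker_eq, pv_costs_fold K acc.1 (pvAQueryState nodes K q).1 hacc (pv_state_len nodes K q)]
      rw [hstep]
      exact ih _ (by simp [List.length_zipWith, pv_query_state_eq, pv_state_len, hacc])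

-- ===== VERDICT (by name: the statement is the Claim_ definition above) =====
theorem compute_term_based_cost_spec : Claim_equal_compute_term_based_cost := by
  intro queries nodes K _ _
  unfold Spec_compute_term_based_cost compute_term_based_cost compute_term_based_cost_alt
  exact pv_main_fold nodes K queries _ (by simp)
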